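-- pv_equiv track=rewrite | github.com/jhomen368/web-to-openwebui | webowui/scraper/cleaning_profiles/builtin_profiles/mediawiki_profile.py | _remove_infoboxes
-- ===== SOURCE A (Python) =====
-- def _remove_infoboxes(content: str) -> str:
--     """
--     Remove infobox metadata tables from top of content.
--
--     Infoboxes are typically markdown tables at the start of articles
--     containing structured metadata that's not useful for embeddings.
--
--     Args:
--         content: Content with potential infoboxes
--
--     Returns:
--         Content with infoboxes removed
--     """
--     lines = content.split("\n")
--     cleaned_lines = []
--     in_table = False
--     table_start = -1
--     lines_since_last_content = 0
--
--     for i, line in enumerate(lines):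
--         # Detect table start (must be near top of document)
--         if i < 50 and "|" in line and ("---" in line or line.strip().startswith("|")):
--             if not in_table:
--                 in_table = True
--                 table_start = i
--                 # Check if this looks like an infobox (has key-value pairs)
--                 continue
--         elif in_table:
--             # Still in table
--             if "|" in line:
--                 continue
--             else:
--                 # Table ended - was it an infobox?
--                 # Infoboxes are typically short (< 30 lines) and at document start
--                 table_length = i - table_start
--                 if table_length < 30 and table_start < 20:
--                     # Likely an infobox, skip it (already not added to cleaned_lines)
--                     pass
--                 else:
--                     # Not an infobox, add the table lines back
--                     cleaned_lines.extend(lines[table_start:i])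
--                 in_table = False
--                 table_start = -1
--
--         # Add non-table lines
--         if not in_table:
--             cleaned_lines.append(line)
--             if line.strip():
--                 lines_since_last_content = 0
--             else:
--                 lines_since_last_content += 1
--
--     return "\n".join(cleaned_lines)
-- ===== SOURCE B (Python) =====
-- def _remove_infoboxes(content: str) -> str:
--     lines = content.split("\n")
--     n = len(lines)
--     out = []
--     i = 0
--     while i < n:
--         line = lines[i]
--         if i < 50 and "|" in line and ("---" in line or line.strip().startswith("|")):
--             # table block: consecutive lines containing "|"
--             j = i + 1
--             while j < n and "|" in lines[j]:
--                 j += 1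
--             if j < n and not (j - i < 30 and i < 20):
--                 out.extend(lines[i:j])
--             # if j == n the table never terminated: dropped
--             i = j
--         else:
--             out.append(line)
--             i += 1
--     return "\n".join(out)
-- ===== Notes on version B (the rewrite author's own statement) =====
-- stated objective: simpler
-- what changed: A's single pass driven by in_table/table_start state flags (with an unused lines_since_last_content counter) is replaced by an index-based scan that, on detecting a table start, directly advances to the block's end and decides once whether to drop or keep the whole block.
import Mathlib
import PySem

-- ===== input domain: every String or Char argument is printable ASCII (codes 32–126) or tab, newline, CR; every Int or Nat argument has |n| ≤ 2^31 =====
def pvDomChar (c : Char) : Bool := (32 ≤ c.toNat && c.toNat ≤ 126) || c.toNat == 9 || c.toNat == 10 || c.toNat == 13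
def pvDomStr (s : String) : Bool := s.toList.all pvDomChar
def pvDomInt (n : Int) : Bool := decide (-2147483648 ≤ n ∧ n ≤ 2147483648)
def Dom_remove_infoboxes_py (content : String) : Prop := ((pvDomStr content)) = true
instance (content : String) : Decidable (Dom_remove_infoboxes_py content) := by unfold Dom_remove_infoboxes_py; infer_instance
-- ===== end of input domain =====

-- B replaces A's flag-driven single pass (in_table / table_start state machine) by an
-- index-based scan that finds each table block's end directly; objective: simpler.

-- pvBar line = ("|" in line)
def pvBar (s : String) : Bool := PySem.Str.isIn "|" s

-- ===== PORT A =====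
-- fold state: (cleaned_lines, in_table, table_start, lines_since_last_content)
def pvStepA (lines : List String) (st : List String × Bool × Int × Int)
    (p : Int × String) : List String × Bool × Int × Int :=
  if decide (p.1 < 50) && pvBar p.2 &&
      (PySem.Str.isIn "---" p.2 || PySem.Str.startswith (PySem.Str.strip p.2) "|") then
    if !st.2.1 then (st.1, true, p.1, st.2.2.2) else st
  else if st.2.1 then
    if pvBar p.2 then st
    else
      ((if decide (p.1 - st.2.2.1 < 30) && decide (st.2.2.1 < 20) then st.1
        else st.1 ++ PySem.List.slice lines (some st.2.2.1) (some p.1)) ++ [p.2],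
       false, -1,
       if PySem.Str.strip p.2 = "" then st.2.2.2 + 1 else 0)
  else (st.1 ++ [p.2], st.2.1, st.2.2.1,
        if PySem.Str.strip p.2 = "" then st.2.2.2 + 1 else 0)

def remove_infoboxes_py (content : String) : String :=
  -- split? is some because the separator "\n" is nonempty
  let lines := (PySem.Str.split? content "\n").getD []
  let st := (PySem.List.enumerate lines 0).foldl (pvStepA lines) ([], false, -1, 0)
  PySem.Str.join "\n" st.1

-- ===== PORT B =====
def pvAltGo (i : Nat) (l : List String) : List String :=
  match l with
  | [] => []
  | line :: rest =>
    if decide (i < 50) && pvBar line &&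
        (PySem.Str.isIn "---" line || PySem.Str.startswith (PySem.Str.strip line) "|") then
      -- table block: this line plus the consecutive following lines containing "|"
      let tl := rest.takeWhile pvBar
      let rest' := rest.drop tl.length
      let j := i + 1 + tl.length
      (if !rest'.isEmpty && !(decide (j - i < 30) && decide (i < 20)) then line :: tl else [])
        ++ pvAltGo j rest'
    else line :: pvAltGo (i + 1) rest
  termination_by l.length
  decreasing_by
    all_goals (simp; try omega)

def remove_infoboxes_py_alt (content : String) : String :=
  PySem.Str.join "\n" (pvAltGo 0 ((PySem.Str.split? content "\n").getD []))

-- ===== PRECONDITION & SPEC =====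
def Spec_remove_infoboxes_py (content : String) (out : String) : Prop := out = remove_infoboxes_py_alt content
instance (content : String) (out : String) : Decidable (Spec_remove_infoboxes_py content out) := by unfold Spec_remove_infoboxes_py; infer_instance

-- ===== CLAIM (what is proved, stated in full; the proofs are below) =====
def Claim_equal_remove_infoboxes_py : Prop := ∀ (content : String), Dom_remove_infoboxes_py content → Spec_remove_infoboxes_py content (remove_infoboxes_py content)

-- ===== LEMMAS AND PROOFS =====

-- a line containing "|" leaves the in-table state unchanged
theorem pvStepA_bar_skip (lines : List String) (acc : List String) (ts lsc : Int)
    (i : Int) (x : String) (hbar : pvBar x = true) :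
    pvStepA lines (acc, true, ts, lsc) (i, x) = (acc, true, ts, lsc) := by
  simp only [pvStepA, hbar]
  split_ifs <;> simp_all

-- the fold skips the "|"-prefix of the remaining lines without changing state
theorem pvSkipBars (lines : List String) : ∀ (l acc : List String) (ts lsc i : Int),
    (PySem.List.enumerate l i).foldl (pvStepA lines) (acc, true, ts, lsc)
    = (PySem.List.enumerate (l.drop (l.takeWhile pvBar).length)
        (i + (l.takeWhile pvBar).length)).foldl (pvStepA lines) (acc, true, ts, lsc) := by
  intro l
  induction l with
  | nil => intro acc ts lsc i; simp
  | cons x xs ih =>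
    intro acc ts lsc i
    by_cases hbar : pvBar x = true
    · rw [List.takeWhile_cons_of_pos hbar, List.length_cons, List.drop_succ_cons,
        PySem.List.enumerate_cons, List.foldl_cons,
        pvStepA_bar_skip lines acc ts lsc i x hbar, ih]
      congr 1
      push_cast; ring_nf
    · rw [List.takeWhile_cons_of_neg (by simpa using hbar)]
      simp
-- the first line after the "|"-prefix does not contain "|"
theorem pvDropHead_noBar : ∀ (xs rl : List String) (y : String),
    xs.drop (xs.takeWhile pvBar).length = y :: rl → pvBar y = false := by
  intro xs
  induction xs with
  | nil => intro rl y h; simp at h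
  | cons x l ih =>
    intro rl y h
    by_cases hp : pvBar x = true
    · rw [List.takeWhile_cons_of_pos hp, List.length_cons, List.drop_succ_cons] at h
      exact ih rl y h
    · rw [List.takeWhile_cons_of_neg (by simpa using hp)] at h
      simp at h
      rw [← h.1]
      simpa using hp

-- main invariant: out of the table at index i, the rest of A's fold produces pvAltGo i
theorem pvMain (lines : List String) : ∀ (N : Nat) (l : List String), l.length ≤ N →
    ∀ (i : Nat) (acc : List String) (ts0 lsc : Int), l = lines.drop i →
    ((PySem.List.enumerate l (i : Int)).foldl (pvStepA lines) (acc, false, ts0, lsc)).1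
      = acc ++ pvAltGo i l := by
  intro N
  induction N with
  | zero =>
    intro l hl i acc ts0 lsc _
    have : l = [] := List.eq_nil_of_length_eq_zero (Nat.le_zero.mp hl)
    subst this; simp [pvAltGo]
  | succ N ih =>
    intro l hl i acc ts0 lsc hdrop
    match l, hdrop with
    | [], _ => simp [pvAltGo]
    | x :: xs, hdrop =>
      have hxs : xs = lines.drop (i + 1) := by
        have := congrArg List.tail hdrop
        simp [List.tail_drop] at this
        exact this
      by_cases hcond : (decide (i < 50) && pvBar x &&
          (PySem.Str.isIn "---" x || PySem.Str.startswith (PySem.Str.strip x) "|")) = true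
      · -- table starts at i
        have hcondI : (decide ((i : Int) < 50) && pvBar x &&
            (PySem.Str.isIn "---" x || PySem.Str.startswith (PySem.Str.strip x) "|")) = true := by
          simpa [show ((i : Int) < 50 ↔ i < 50) from by exact_mod_cast Iff.rfl] using hcond
        rw [PySem.List.enumerate_cons, List.foldl_cons]
        have hstep : pvStepA lines (acc, false, ts0, lsc) ((i : Int), x)
            = (acc, true, (i : Int), lsc) := by
          simp only [pvStepA, hcondI]; rfl
        rw [hstep, pvSkipBars]
        set tl := xs.takeWhile pvBar with htl
        set k := tl.length with hk
        have hprefl : tl <+: xs := List.takeWhile_prefix _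
        have hkxs : k ≤ xs.length := hprefl.length_le
        match hR : xs.drop k with
        | [] =>
          have hAlt : pvAltGo i (x :: xs) = [] := by
            rw [pvAltGo]
            simp only [hcond, if_pos, ← htl, ← hk, hR]
            simp [pvAltGo]
          simp [hAlt]
        | rl :: rs =>
          have hnobar : pvBar rl = false := pvDropHead_noBar xs rs rl hR
          rw [PySem.List.enumerate_cons, List.foldl_cons]
          have hstep2 : pvStepA lines (acc, true, (i : Int), lsc) (((i : Int) + 1 + (k : Int)), rl)
              = ((if decide (((i : Int) + 1 + (k : Int)) - (i : Int) < 30) && decide ((i : Int) < 20)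
                   then acc
                   else acc ++ PySem.List.slice lines (some (i : Int)) (some ((i : Int) + 1 + (k : Int)))) ++ [rl],
                 false, -1,
                 if PySem.Str.strip rl = "" then lsc + 1 else 0) := by
            simp [pvStepA, hnobar]
          rw [hstep2]
          have hrlines : (rl :: rs : List String) = lines.drop (i + 1 + k) := by
            rw [← hR, hxs, List.drop_drop]
          have hrs : rs = lines.drop (i + 1 + k + 1) := by
            have := congrArg List.tail hrlines
            simp [List.tail_drop] at this
            exact this
          have hlen : rs.length ≤ N := by
            have h1 : (rl :: rs).length ≤ xs.length := by
              rw [← hR, List.length_drop]; exact Nat.sub_le xs.length k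
            have h2 : (x :: xs).length ≤ N + 1 := hl
            simp at h1 h2; omega
          have hIH := ih rs hlen (i + 1 + k + 1)
            ((if decide (((i : Int) + 1 + (k : Int)) - (i : Int) < 30) && decide ((i : Int) < 20)
               then acc
               else acc ++ PySem.List.slice lines (some (i : Int)) (some ((i : Int) + 1 + (k : Int)))) ++ [rl])
            (-1) (if PySem.Str.strip rl = "" then lsc + 1 else 0) hrs
          have hcast : ((i : Int) + 1 + (k : Int) + 1) = ((i + 1 + k + 1 : Nat) : Int) := by push_cast; ring
          rw [hcast, hIH]
          -- compare with pvAltGo on the B side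
          have hslice : PySem.List.slice lines (some (i : Int)) (some ((i : Int) + 1 + (k : Int)))
              = x :: tl := by
            have h1 : ((i : Int) + 1 + (k : Int)) = (((i + 1 + k : Nat)) : Int) := by push_cast; ring
            rw [h1, PySem.List.slice_natCast, ← hdrop]
            have h2 : i + 1 + k - i = k + 1 := by omega
            rw [h2, List.take_succ_cons]
            exact congrArg (x :: ·) (List.prefix_iff_eq_take.mp hprefl).symm
          have hcondeq : (decide (((i : Int) + 1 + (k : Int)) - (i : Int) < 30) && decide ((i : Int) < 20))
              = (decide ((i + 1 + k) - i < 30) && decide (i < 20)) := by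
            have e1 : (((i : Int) + 1 + (k : Int)) - (i : Int) < 30) ↔ ((i + 1 + k) - i < 30) := by
              constructor <;> intro h <;> omega
            have e2 : ((i : Int) < 20) ↔ (i < 20) := by exact_mod_cast Iff.rfl
            rw [decide_eq_decide.mpr e1, decide_eq_decide.mpr e2]
          have hAltrl : pvAltGo (i + 1 + k) (rl :: rs) = rl :: pvAltGo (i + 1 + k + 1) rs := by
            rw [pvAltGo]
            have hc : (decide (i + 1 + k < 50) && pvBar rl &&
                (PySem.Str.isIn "---" rl || PySem.Str.startswith (PySem.Str.strip rl) "|")) = false := by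
              simp [hnobar]
            simp only [hc, Bool.false_eq_true, if_false]
          rw [pvAltGo]
          simp only [hcond, if_pos, ← htl, ← hk, hR]
          rw [hAltrl, hcondeq, hslice]
          by_cases hdropcond : (decide ((i + 1 + k) - i < 30) && decide (i < 20)) = true
          · simp [hdropcond]
          · simp only [Bool.not_eq_true] at hdropcond
            simp [hdropcond]
      · -- ordinary line at i
        have hcondI : (decide ((i : Int) < 50) && pvBar x &&
            (PySem.Str.isIn "---" x || PySem.Str.startswith (PySem.Str.strip x) "|")) = false := by
          simp only [Bool.not_eq_true] at hcond
          simpa [show ((i : Int) < 50 ↔ i < 50) from by exact_mod_cast Iff.rfl] using hcond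
        rw [PySem.List.enumerate_cons, List.foldl_cons]
        have hstep : pvStepA lines (acc, false, ts0, lsc) ((i : Int), x)
            = (acc ++ [x], false, ts0, if PySem.Str.strip x = "" then lsc + 1 else 0) := by
          simp only [pvStepA, hcondI]; rfl
        rw [hstep]
        have hlen : xs.length ≤ N := by simpa using Nat.le_of_succ_le_succ (by simpa using hl)
        have hcast : ((i : Int) + 1) = ((i + 1 : Nat) : Int) := by push_cast; ring
        rw [hcast, ih xs hlen (i + 1) _ ts0 _ hxs]
        rw [pvAltGo]
        simp only [hcond, Bool.false_eq_true, if_false]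
        simp

-- ===== VERDICT (by name: the statement is the Claim_ definition above) =====
theorem remove_infoboxes_py_spec : Claim_equal_remove_infoboxes_py := by
  intro content _
  unfold Spec_remove_infoboxes_py remove_infoboxes_py remove_infoboxes_py_alt
  have hm := pvMain ((PySem.Str.split? content "\n").getD []) _ _ (le_refl _) 0 [] (-1) 0 rfl
  simp only [Nat.cast_zero, List.drop_zero, List.nil_append] at hm
  show PySem.Str.join "\n" ((List.foldl (pvStepA ((PySem.Str.split? content "\n").getD []))
      ([], false, -1, 0) (PySem.List.enumerate ((PySem.Str.split? content "\n").getD []) 0)).1)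
    = PySem.Str.join "\n" (pvAltGo 0 ((PySem.Str.split? content "\n").getD []))
  rw [hm]
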